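-- pv_equiv track=rewrite | github.com/danielgonzagat/act | scripts/gen_family7_dla_from_history_v111.py | _inject_adversarial_turns_v111
-- ===== SOURCE A (Python) =====
-- from typing import Any, Dict, List, Optional, Sequence, Tuple
--
-- def _inject_adversarial_turns_v111(user_turns: Sequence[str]) -> List[str]:
--     """
--     Deterministic, minimal injection (no dependency on content).
--     """
--     out = list([str(x) for x in user_turns if isinstance(x, str)])
--     inject = [
--         ("ok", 3),
--         ("continua", 7),
--         ("isso", 11),
--         ("na verdade era X, não Y", 17),
--         ("não invente nada", 23),
--         ("ok", 29),
--     ]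
--     for text, pos in sorted(inject, key=lambda t: int(t[1])):
--         i = int(pos)
--         if i < 0:
--             continue
--         if i > len(out):
--             i = len(out)
--         out.insert(i, str(text))
--     return list(out)
-- ===== SOURCE B (Python) =====
-- from typing import List, Sequence
--
-- def _inject_adversarial_turns_v111(user_turns: Sequence[str]) -> List[str]:
--     """Closed-form: concatenate fixed slices of the filtered input around the
--     six adversarial strings at their pre-shifted positions (3,6,9,14,19,24);
--     Python slice clamping reproduces the end-append behaviour on short inputs."""
--     base = [str(x) for x in user_turns if isinstance(x, str)]
--     return (base[:3] + ["ok"]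
--             + base[3:6] + ["continua"]
--             + base[6:9] + ["isso"]
--             + base[9:14] + ["na verdade era X, não Y"]
--             + base[14:19] + ["não invente nada"]
--             + base[19:24] + ["ok"]
--             + base[24:])
-- ===== Notes on version B (the rewrite author's own statement) =====
-- stated objective: simpler
-- what changed: Replaced the sort of the constant pair list and the loop of six clamped in-place list.insert calls into a growing list by a single closed-form concatenation of clamped slices of the filtered input around the six fixed strings at their pre-shifted positions (3,6,9,14,19,24).
import Mathlib
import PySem

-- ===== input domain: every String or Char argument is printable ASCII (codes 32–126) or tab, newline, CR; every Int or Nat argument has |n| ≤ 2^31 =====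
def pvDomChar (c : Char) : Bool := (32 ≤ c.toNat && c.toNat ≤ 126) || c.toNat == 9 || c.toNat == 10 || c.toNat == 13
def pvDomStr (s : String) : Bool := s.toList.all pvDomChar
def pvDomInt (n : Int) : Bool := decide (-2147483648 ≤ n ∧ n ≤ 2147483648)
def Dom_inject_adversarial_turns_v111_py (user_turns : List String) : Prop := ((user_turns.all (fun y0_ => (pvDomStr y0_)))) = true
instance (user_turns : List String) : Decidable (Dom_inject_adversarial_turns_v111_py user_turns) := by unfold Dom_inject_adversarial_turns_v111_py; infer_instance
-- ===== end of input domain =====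

-- B replaces A's sort + six clamped in-place inserts by one closed-form
-- concatenation of clamped slices around the fixed strings (simpler, no loop).

-- ===== PORT A =====
-- the constant `inject` list of (text, position) pairs
def pvInjectList : List (String × Int) :=
  [("ok", 3), ("continua", 7), ("isso", 11),
   ("na verdade era X, não Y", 17), ("não invente nada", 23), ("ok", 29)]

def inject_adversarial_turns_v111_py (user_turns : List String) : List String :=
  -- out = list([str(x) for x in user_turns if isinstance(x, str)])  (all elements are str here)
  let out := user_turns.map (fun x => x)
  -- for text, pos in sorted(inject, key=lambda t: int(t[1])): … out.insert(i, str(text))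
  (PySem.List.sorted pvInjectList (fun t => t.2) false).foldl
    (fun out tp =>
      let i : Int := tp.2
      if i < 0 then out
      else
        let i2 : Int := if i > (out.length : Int) then (out.length : Int) else i
        PySem.List.insert out i2 tp.1)
    out

-- ===== PORT B =====
def inject_adversarial_turns_v111_py_alt (user_turns : List String) : List String :=
  let base := user_turns.map (fun x => x)
  PySem.List.slice base none (some 3) ++ ["ok"]
    ++ PySem.List.slice base (some 3) (some 6) ++ ["continua"]
    ++ PySem.List.slice base (some 6) (some 9) ++ ["isso"]
    ++ PySem.List.slice base (some 9) (some 14) ++ ["na verdade era X, não Y"]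
    ++ PySem.List.slice base (some 14) (some 19) ++ ["não invente nada"]
    ++ PySem.List.slice base (some 19) (some 24) ++ ["ok"]
    ++ PySem.List.slice base (some 24) none

-- ===== PRECONDITION & SPEC =====
def Spec_inject_adversarial_turns_v111_py (user_turns : List String) (out : List String) : Prop := out = inject_adversarial_turns_v111_py_alt user_turns
instance (user_turns : List String) (out : List String) : Decidable (Spec_inject_adversarial_turns_v111_py user_turns out) := by unfold Spec_inject_adversarial_turns_v111_py; infer_instance

-- ===== CLAIM (what is proved, stated in full; the proofs are below) =====
def Claim_equal_inject_adversarial_turns_v111_py : Prop := ∀ (user_turns : List String), Dom_inject_adversarial_turns_v111_py user_turns → Spec_inject_adversarial_turns_v111_py user_turns (inject_adversarial_turns_v111_py user_turns)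

-- ===== LEMMAS AND PROOFS =====

-- the constant list is already position-sorted
theorem pv_sorted_inject :
    PySem.List.sorted pvInjectList (fun t => t.2) false = pvInjectList :=
  PySem.List.sorted_eq_self_of_pairwise pvInjectList (fun t => t.2) (by decide)

-- one body step of A's loop: the clamped insert is take/drop at the position
theorem pv_body_step (l : List String) (x : String) (p : Int) (hp : 0 ≤ p) :
    (if p < 0 then l
     else PySem.List.insert l (if p > (l.length : Int) then (l.length : Int) else p) x)
      = l.take p.toNat ++ x :: l.drop p.toNat := by
  rw [if_neg (by omega)]
  by_cases h : p > (l.length : Int)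
  · rw [if_pos h]
    have h1 : PySem.List.insert l ((l.length : Nat) : Int) x
        = l.take l.length ++ x :: l.drop l.length :=
      PySem.List.insert_natCast l l.length x (le_refl _)
    rw [h1]
    have hlen : l.length ≤ p.toNat := by omega
    simp [List.take_of_length_le hlen, List.take_length, List.drop_length,
      List.drop_eq_nil_of_le hlen]
  · rw [if_neg h]
    have hle : p.toNat ≤ l.length := by omega
    have : p = ((p.toNat : Nat) : Int) := by omega
    rw [this, PySem.List.insert_natCast l p.toNat x hle]; simp only [Int.toNat_natCast]

-- inserting at position t+k into (pre ++ u.drop d) with |pre| = min d |u| + k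
-- splits the suffix at absolute position t
theorem pv_seg_step (u pre : List String) (d p t k : Nat) (x : String)
    (hpre : pre.length = min d u.length + k) (hdt : d ≤ t) (hp : p = t + k) :
    (pre ++ u.drop d).take p ++ x :: (pre ++ u.drop d).drop p
      = (pre ++ (u.drop d).take (t - d) ++ [x]) ++ u.drop t := by
  subst hp
  have hlen : pre.length ≤ t + k := by omega
  rw [List.take_append, List.drop_append,
    List.take_of_length_le hlen, List.drop_eq_nil_of_le hlen, List.nil_append]
  by_cases hd : d ≤ u.length
  · have h1 : t + k - pre.length = t - d := by omega
    rw [h1]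
    have h2 : (u.drop d).drop (t - d) = u.drop t := by
      rw [List.drop_drop]; congr 1; omega
    rw [h2]; simp [List.append_assoc]
  · have hnil : u.drop d = [] := List.drop_eq_nil_of_le (by omega)
    have hnil' : u.drop t = [] := List.drop_eq_nil_of_le (by omega)
    simp [hnil, hnil']

theorem pv_main (u : List String) :
    inject_adversarial_turns_v111_py u = inject_adversarial_turns_v111_py_alt u := by
  unfold inject_adversarial_turns_v111_py inject_adversarial_turns_v111_py_alt
  rw [pv_sorted_inject]
  simp only [pvInjectList, List.foldl_cons, List.foldl_nil, List.map_id']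
  rw [pv_body_step _ _ 29 (by norm_num), pv_body_step _ _ 23 (by norm_num),
    pv_body_step _ _ 17 (by norm_num), pv_body_step _ _ 11 (by norm_num),
    pv_body_step _ _ 7 (by norm_num), pv_body_step _ _ 3 (by norm_num)]
  norm_num only [Int.toNat]
  rw [show u.take 3 ++ "ok" :: u.drop 3 = (u.take 3 ++ ["ok"]) ++ u.drop 3 by
    simp [List.append_assoc]]
  rw [pv_seg_step u (u.take 3 ++ ["ok"]) 3 7 6 1 "continua"
    (by simp) (by omega) (by norm_num)]
  rw [pv_seg_step u ((u.take 3 ++ ["ok"]) ++ (u.drop 3).take (6 - 3) ++ ["continua"])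
    6 11 9 2 "isso" (by simp; omega) (by omega) (by norm_num)]
  rw [pv_seg_step u (((u.take 3 ++ ["ok"]) ++ (u.drop 3).take (6 - 3) ++ ["continua"])
      ++ (u.drop 6).take (9 - 6) ++ ["isso"])
    9 17 14 3 "na verdade era X, não Y" (by simp; omega) (by omega) (by norm_num)]
  rw [pv_seg_step u ((((u.take 3 ++ ["ok"]) ++ (u.drop 3).take (6 - 3) ++ ["continua"])
      ++ (u.drop 6).take (9 - 6) ++ ["isso"]) ++ (u.drop 9).take (14 - 9) ++ ["na verdade era X, não Y"])
    14 23 19 4 "não invente nada" (by simp; omega) (by omega) (by norm_num)]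
  rw [pv_seg_step u (((((u.take 3 ++ ["ok"]) ++ (u.drop 3).take (6 - 3) ++ ["continua"])
      ++ (u.drop 6).take (9 - 6) ++ ["isso"]) ++ (u.drop 9).take (14 - 9) ++ ["na verdade era X, não Y"])
      ++ (u.drop 14).take (19 - 14) ++ ["não invente nada"])
    19 29 24 5 "ok" (by simp; omega) (by omega) (by norm_num)]
  rw [PySem.List.slice_to _ (by norm_num), PySem.List.slice_from _ (by norm_num),
    PySem.List.slice_toNat _ (by norm_num) (by norm_num),
    PySem.List.slice_toNat _ (by norm_num) (by norm_num),
    PySem.List.slice_toNat _ (by norm_num) (by norm_num),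
    PySem.List.slice_toNat _ (by norm_num) (by norm_num),
    PySem.List.slice_toNat _ (by norm_num) (by norm_num)]
  simp only [show Int.toNat 3 = 3 from rfl, show Int.toNat 6 = 6 from rfl,
    show Int.toNat 9 = 9 from rfl, show Int.toNat 14 = 14 from rfl,
    show Int.toNat 19 = 19 from rfl, show Int.toNat 24 = 24 from rfl]

-- ===== VERDICT (by name: the statement is the Claim_ definition above) =====
theorem inject_adversarial_turns_v111_py_spec : Claim_equal_inject_adversarial_turns_v111_py := by
  intro u _
  exact pv_main u
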